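-- pv_equiv track=rewrite | github.com/joshgulledge/code_challenge | python/Wave.py | wave
-- ===== SOURCE A (Python) =====
-- def wave(people):
--   arr = []
--   letters = list(people)
--
--   for i in range(len(people)):
--     if letters[i] == " ":
--       continue
--     letters[i] = letters[i].upper()
--     arr.append("".join(letters.copy()))
--     letters[i] = letters[i].lower()
--
--   return arr
-- ===== SOURCE B (Python) =====
-- def wave(people):
--     return [people[:i].lower() + people[i].upper() + people[i+1:]
--             for i in range(len(people)) if people[i] != " "]
-- ===== Notes on version B (the rewrite author's own statement) =====
-- stated objective: simpler
-- what changed: B replaces A's shared mutable letter list (uppercase, snapshot-join, lowercase back) with a pure comprehension that builds each wave string by slicing: lowered prefix + uppercased letter + untouched suffix.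
import Mathlib
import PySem

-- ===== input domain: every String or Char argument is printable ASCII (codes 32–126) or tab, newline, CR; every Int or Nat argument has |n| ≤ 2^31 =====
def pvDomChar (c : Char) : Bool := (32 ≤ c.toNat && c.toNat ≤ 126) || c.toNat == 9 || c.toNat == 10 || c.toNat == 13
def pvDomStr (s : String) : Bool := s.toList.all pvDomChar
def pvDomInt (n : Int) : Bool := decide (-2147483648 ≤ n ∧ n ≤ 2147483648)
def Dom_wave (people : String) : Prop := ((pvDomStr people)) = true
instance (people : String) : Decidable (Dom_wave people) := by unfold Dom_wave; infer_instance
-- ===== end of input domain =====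

-- B builds each wave string by pure slicing (lowered prefix ++ uppercased char ++ untouched suffix)
-- instead of A's shared mutable letter list; objective: simpler, no mutation, same cost.

-- ===== PORT A =====
-- loop body of A: mutate letters[i] to upper, append the joined copy, mutate back to lower
def waveStep (st : List Char × List String) (i : Nat) : List Char × List String :=
  if st.1.getD i ' ' = ' ' then st
  else
    let l1 := st.1.set i (PySem.Chars.upperChar (st.1.getD i ' '))
    let arr := st.2 ++ [String.ofList l1]
    let l2 := l1.set i (PySem.Chars.lowerChar (l1.getD i ' '))
    (l2, arr)

def wave (people : String) : List String :=
  let letters := people.toList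
  ((List.range letters.length).foldl waveStep (letters, [])).2

-- ===== PORT B =====
-- one wave string of B: people[:i].lower() + people[i].upper() + people[i+1:], none when people[i] == " "
def waveAltBody (cs : List Char) (i : Nat) : Option String :=
  let c := cs.getD i ' '
  if c = ' ' then none
  else some (String.ofList (PySem.Chars.lower (cs.take i) ++ PySem.Chars.upperChar c :: cs.drop (i+1)))

def wave_alt (people : String) : List String :=
  let cs := people.toList
  (List.range cs.length).filterMap (waveAltBody cs)

-- ===== PRECONDITION & SPEC =====
def Spec_wave (people : String) (out : List String) : Prop := out = wave_alt people
instance (people : String) (out : List String) : Decidable (Spec_wave people out) := by unfold Spec_wave; infer_instance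

-- ===== CLAIM (what is proved, stated in full; the proofs are below) =====
def Claim_equal_wave : Prop := ∀ (people : String), Dom_wave people → Spec_wave people (wave people)

-- ===== LEMMAS AND PROOFS =====
theorem pvToNat_ofNat (n : Nat) (h : n < 55296) : (Char.ofNat n).toNat = n := by
  have : n.isValidChar := Or.inl h
  simp [Char.ofNat, this]

theorem pvCharLe (a b : Char) : a ≤ b ↔ a.toNat ≤ b.toNat := by
  rw [Char.le_def, UInt32.le_iff_toNat_le]; rfl

-- lowering an uppercased char is the same as lowering the char itself (ASCII tables of PySem)
theorem pvLowUp (c : Char) : PySem.Chars.lowerChar (PySem.Chars.upperChar c) = PySem.Chars.lowerChar c := by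
  have ha : 'a'.toNat = 97 := rfl
  have hz : 'z'.toNat = 122 := rfl
  have hA : 'A'.toNat = 65 := rfl
  have hZ : 'Z'.toNat = 90 := rfl
  simp only [PySem.Chars.lowerChar, PySem.Chars.upperChar, PySem.Chars.islower, PySem.Chars.isupper,
    Bool.and_eq_true, decide_eq_true_eq, pvCharLe, ha, hz, hA, hZ]
  split_ifs with h1 h2 h3 <;> try rfl
  all_goals
    try (have e : (Char.ofNat (c.toNat - 32)).toNat = c.toNat - 32 := pvToNat_ofNat _ (by omega))
  · exfalso; omega
  · rw [e]
    have h32 : c.toNat - 32 + 32 = c.toNat := by omega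
    rw [h32, Char.ofNat_toNat]
  all_goals (exfalso; rw [e] at h2; omega)

theorem pvSetAppend {α : Type} (xs ys : List α) (y x : α) (k : Nat) (hk : xs.length = k) :
    (xs ++ y :: ys).set k x = xs ++ x :: ys := by
  subst hk
  induction xs with
  | nil => rfl
  | cons a t ih => simp [ih]

theorem pvGetDAppend {α : Type} (xs ys : List α) (y d : α) (k : Nat) (hk : xs.length = k) :
    (xs ++ y :: ys).getD k d = y := by
  subst hk
  induction xs with
  | nil => rfl
  | cons a t ih => simp only [List.length_cons, List.cons_append, List.getD_cons_succ]; exact ih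

-- loop invariant: after i steps the letter list is the lowered prefix ++ untouched suffix,
-- and the accumulated arr is exactly B's output over the first i indices
theorem pvInv (cs : List Char) (i : Nat) (h : i ≤ cs.length) :
    (List.range i).foldl waveStep (cs, []) =
      ((cs.take i).map PySem.Chars.lowerChar ++ cs.drop i,
       (List.range i).filterMap (waveAltBody cs)) := by
  induction i with
  | zero => simp
  | succ k ih =>
    have hk : k < cs.length := by omega
    have ihk := ih (by omega)
    rw [List.range_succ, List.foldl_append, List.filterMap_append, ihk]
    have hdrop : cs.drop k = cs[k] :: cs.drop (k+1) := List.drop_eq_getElem_cons hk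
    have htake : cs.take (k+1) = cs.take k ++ [cs[k]] := List.take_succ_eq_append_getElem hk
    have hlenp : ((cs.take k).map PySem.Chars.lowerChar).length = k := by
      simp [List.length_take, Nat.min_eq_left (le_of_lt hk)]
    simp only [List.foldl_cons, List.foldl_nil, List.filterMap_cons, List.filterMap_nil]
    unfold waveStep waveAltBody
    rw [hdrop]
    have hget : (((cs.take k).map PySem.Chars.lowerChar) ++ cs[k] :: cs.drop (k+1)).getD k ' ' = cs[k] :=
      pvGetDAppend _ _ _ _ _ hlenp
    have hgetB : cs.getD k ' ' = cs[k] := by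
      simp [List.getD_eq_getElem?_getD, List.getElem?_eq_getElem hk]
    simp only [hget, hgetB]
    by_cases hsp : cs[k] = ' '
    · simp only [hsp]
      rw [htake]
      simp [hsp]
      rfl
    · simp only [if_neg hsp]
      have hset1 : (((cs.take k).map PySem.Chars.lowerChar) ++ cs[k] :: cs.drop (k+1)).set k
          (PySem.Chars.upperChar cs[k])
          = ((cs.take k).map PySem.Chars.lowerChar) ++ PySem.Chars.upperChar cs[k] :: cs.drop (k+1) :=
        pvSetAppend _ _ _ _ _ hlenp
      simp only [hset1]
      have hget2 : (((cs.take k).map PySem.Chars.lowerChar) ++ PySem.Chars.upperChar cs[k] :: cs.drop (k+1)).getD k ' '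
          = PySem.Chars.upperChar cs[k] :=
        pvGetDAppend _ _ _ _ _ hlenp
      have hset2 : (((cs.take k).map PySem.Chars.lowerChar) ++ PySem.Chars.upperChar cs[k] :: cs.drop (k+1)).set k
          (PySem.Chars.lowerChar (PySem.Chars.upperChar cs[k]))
          = ((cs.take k).map PySem.Chars.lowerChar) ++ PySem.Chars.lowerChar (PySem.Chars.upperChar cs[k]) :: cs.drop (k+1) :=
        pvSetAppend _ _ _ _ _ hlenp
      simp only [hget2]
      rw [hset2, pvLowUp, htake]
      refine congrArg₂ Prod.mk ?_ ?_
      · simp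
        rw [List.take_succ_eq_append_getElem (show k < (cs.map PySem.Chars.lowerChar).length by simpa using hk)]
        simp
      · simp [PySem.Chars.lower]

-- ===== VERDICT (by name: the statement is the Claim_ definition above) =====
theorem wave_spec : Claim_equal_wave := by
  intro people _
  unfold Spec_wave wave wave_alt
  show ((List.range people.toList.length).foldl waveStep (people.toList, [])).2
      = (List.range people.toList.length).filterMap (waveAltBody people.toList)
  rw [pvInv people.toList people.toList.length (le_refl _)]
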